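-- pv_equiv track=rewrite | github.com/Grizmo2610/GoogleMeetChatReadingBot | Models/VoiceModel.py | replace_special_chars
-- ===== SOURCE A (Python) =====
-- def replace_special_chars(content: str) -> str:
--     """
--     Replace special characters with their corresponding spoken words in Vietnamese.
--
--     Args:
--         content (str): The input text containing special characters.
--
--     Returns:
--         str: The text with special characters replaced by their spoken equivalents.
--     """
--     special_chars = {
--         "@": "a còng", "#": "thăng", "$": "đô la", "%": "phần trăm",
--         "^": "mũ", "&": "và", "*": "sao", "!": "chấm than", "?": "hỏi chấm",
--         ":": "hai chấm", "=": "bằng", ")": "đóng ngoặc", "(": "mở ngoặc"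
--     }
--     for char, replacement in special_chars.items():
--         content = content.replace(char, replacement)
--     return content
-- ===== SOURCE B (Python) =====
-- def _spoken(c: str) -> str:
--     """Spoken Vietnamese word for a special character, or the character itself."""
--     if c == '@': return 'a còng'
--     if c == '#': return 'thăng'
--     if c == '$': return 'đô la'
--     if c == '%': return 'phần trăm'
--     if c == '^': return 'mũ'
--     if c == '&': return 'và'
--     if c == '*': return 'sao'
--     if c == '!': return 'chấm than'
--     if c == '?': return 'hỏi chấm'
--     if c == ':': return 'hai chấm'
--     if c == '=': return 'bằng'
--     if c == ')': return 'đóng ngoặc'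
--     if c == '(': return 'mở ngoặc'
--     return c
--
-- def replace_special_chars(content: str) -> str:
--     """One left-to-right pass; each character is translated by a branch chain, no dict,
--     no repeated whole-string scans."""
--     parts = []
--     for c in content:
--         parts.append(_spoken(c))
--     return ''.join(parts)
-- ===== Notes on version B (the rewrite author's own statement) =====
-- stated objective: alternative
-- what changed: Replaces thirteen whole-string replace() passes (each rescanning the string) with a single left-to-right pass over the characters, translating each via a branch chain (no dict at all) and joining the pieces once; equivalent because no replacement text contains a special character, so pass order and chaining never matter.
import Mathlib
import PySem

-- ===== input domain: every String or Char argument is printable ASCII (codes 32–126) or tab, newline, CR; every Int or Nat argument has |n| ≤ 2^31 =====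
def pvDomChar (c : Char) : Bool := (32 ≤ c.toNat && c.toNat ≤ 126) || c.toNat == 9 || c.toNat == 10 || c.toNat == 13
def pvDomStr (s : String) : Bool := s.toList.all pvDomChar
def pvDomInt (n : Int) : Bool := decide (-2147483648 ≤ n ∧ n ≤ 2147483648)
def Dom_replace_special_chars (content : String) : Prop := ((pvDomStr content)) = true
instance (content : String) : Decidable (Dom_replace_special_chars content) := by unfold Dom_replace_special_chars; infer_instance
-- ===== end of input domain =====

-- B replaces A's thirteen whole-string replace passes by one left-to-right pass translating
-- each character through a branch chain (no dict); equivalent since no replacement text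
-- contains a special character.


-- ===== PORT A =====
-- the special_chars dict literal, in insertion order
def pvSpecialsA : List (String × String) :=
  [("@", "a còng"), ("#", "thăng"), ("$", "đô la"), ("%", "phần trăm"),
   ("^", "mũ"), ("&", "và"), ("*", "sao"), ("!", "chấm than"), ("?", "hỏi chấm"),
   (":", "hai chấm"), ("=", "bằng"), (")", "đóng ngoặc"), ("(", "mở ngoặc")]

-- for char, replacement in special_chars.items(): content = content.replace(char, replacement)
def replace_special_chars (content : String) : String :=
  pvSpecialsA.foldl (fun acc pr => PySem.Str.replace acc pr.1 pr.2) content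

-- ===== PORT B =====
-- _spoken: branch chain translating one character
def pvSpoken (c : Char) : String :=
  if c = '@' then "a còng"
  else if c = '#' then "thăng"
  else if c = '$' then "đô la"
  else if c = '%' then "phần trăm"
  else if c = '^' then "mũ"
  else if c = '&' then "và"
  else if c = '*' then "sao"
  else if c = '!' then "chấm than"
  else if c = '?' then "hỏi chấm"
  else if c = ':' then "hai chấm"
  else if c = '=' then "bằng"
  else if c = ')' then "đóng ngoặc"
  else if c = '(' then "mở ngoặc"
  else String.ofList [c]

-- parts = []; for c in content: parts.append(_spoken(c)); return ''.join(parts)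
def replace_special_chars_alt (content : String) : String :=
  PySem.Str.join "" (content.toList.map pvSpoken)

-- ===== PRECONDITION & SPEC =====
def Spec_replace_special_chars (content : String) (out : String) : Prop := out = replace_special_chars_alt content
instance (content : String) (out : String) : Decidable (Spec_replace_special_chars content out) := by unfold Spec_replace_special_chars; infer_instance

-- ===== CLAIM (what is proved, stated in full; the proofs are below) =====
def Claim_equal_replace_special_chars : Prop := ∀ (content : String), Dom_replace_special_chars content → Spec_replace_special_chars content (replace_special_chars content)

-- ===== LEMMAS AND PROOFS =====

-- single-char str.replace is a flatMap over the characters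
theorem replace_single_go (p : Char) (r : List Char) (l acc : List Char) :
    PySem.Chars.replace.go [p] r l.length l acc
      = acc.reverse ++ l.flatMap (fun c => if c = p then r else [c]) := by
  induction l generalizing acc with
  | nil => simp [PySem.Chars.replace.go]
  | cons c t ih =>
    by_cases h : c = p
    · subst h
      simpa [PySem.Chars.replace.go, List.isPrefixOf] using ih (r.reverse ++ acc)
    · have hpre : [p].isPrefixOf (c :: t) = false := by
        simp [List.isPrefixOf, Ne.symm h]
      simpa [PySem.Chars.replace.go, hpre, h] using ih (c :: acc)

theorem replace_single (p : Char) (r s : List Char) :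
    PySem.Chars.replace s [p] r = s.flatMap (fun c => if c = p then r else [c]) := by
  simpa [PySem.Chars.replace] using replace_single_go p r s []

-- the A-side fold is additive over ++ (every pass is a flatMap)
theorem foldA_append (t : List (String × String)) (ht : ∀ pr ∈ t, pr.1.toList.length = 1)
    (x y : List Char) :
    t.foldl (fun acc pr => PySem.Chars.replace acc pr.1.toList pr.2.toList) (x ++ y)
      = t.foldl (fun acc pr => PySem.Chars.replace acc pr.1.toList pr.2.toList) x
        ++ t.foldl (fun acc pr => PySem.Chars.replace acc pr.1.toList pr.2.toList) y := by
  induction t generalizing x y with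
  | nil => simp
  | cons pr t ih =>
    obtain ⟨p, hp⟩ : ∃ p, pr.1.toList = [p] := by
      have h1 := ht pr (by simp)
      cases hpr : pr.1.toList with
      | nil => simp [hpr] at h1
      | cons a l => cases l with
        | nil => exact ⟨a, rfl⟩
        | cons b l' => simp [hpr] at h1
    have ht' : ∀ q ∈ t, q.1.toList.length = 1 := fun q hq => ht q (by simp [hq])
    simp only [List.foldl_cons, hp, replace_single, List.flatMap_append]
    exact ih ht' _ _

-- per-character agreement: A's 13 passes on [c] produce exactly B's branch-chain image of c
theorem perChar (c : Char) :
    (pvSpecialsA.foldl (fun acc pr => PySem.Chars.replace acc pr.1.toList pr.2.toList) [c])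
      = (pvSpoken c).toList := by
  by_cases h1 : c = '@'; · subst h1; decide
  by_cases h2 : c = '#'; · subst h2; decide
  by_cases h3 : c = '$'; · subst h3; decide
  by_cases h4 : c = '%'; · subst h4; decide
  by_cases h5 : c = '^'; · subst h5; decide
  by_cases h6 : c = '&'; · subst h6; decide
  by_cases h7 : c = '*'; · subst h7; decide
  by_cases h8 : c = '!'; · subst h8; decide
  by_cases h9 : c = '?'; · subst h9; decide
  by_cases h10 : c = ':'; · subst h10; decide
  by_cases h11 : c = '='; · subst h11; decide
  by_cases h12 : c = ')'; · subst h12; decide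
  by_cases h13 : c = '('; · subst h13; decide
  -- c is not special: every A pass leaves [c]; every branch of the chain misses
  simp [pvSpecialsA, pvSpoken, replace_single,
        h1, h2, h3, h4, h5, h6, h7, h8, h9, h10, h11, h12, h13]

theorem join_empty (parts : List (List Char)) : PySem.Chars.join [] parts = parts.flatten := by
  induction parts with
  | nil => simp [PySem.Chars.join, List.intercalate]
  | cons x xs ih =>
    cases xs with
    | nil => simp [PySem.Chars.join, List.intercalate]
    | cons y ys =>
      simp only [PySem.Chars.join, List.intercalate] at ih ⊢
      simp [List.intersperse, List.flatten] at ih ⊢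
      exact ih

theorem main_chars (cs : List Char) :
    pvSpecialsA.foldl (fun acc pr => PySem.Chars.replace acc pr.1.toList pr.2.toList) cs
      = (cs.map (fun c => (pvSpoken c).toList)).flatten := by
  induction cs with
  | nil => decide
  | cons c t ih =>
    have hx := foldA_append pvSpecialsA (by decide) [c] t
    rw [show c :: t = [c] ++ t from rfl, hx, perChar c, ih]
    simp

theorem toList_foldl_replace (t : List (String × String)) (s : String) :
    (t.foldl (fun acc pr => PySem.Str.replace acc pr.1 pr.2) s).toList
      = t.foldl (fun acc pr => PySem.Chars.replace acc pr.1.toList pr.2.toList) s.toList := by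
  induction t generalizing s with
  | nil => rfl
  | cons pr t ih =>
    simp only [List.foldl_cons]
    rw [ih, PySem.Str.toList_replace]

-- ===== VERDICT (by name: the statement is the Claim_ definition above) =====
theorem replace_special_chars_spec : Claim_equal_replace_special_chars := by
  intro content _
  unfold Spec_replace_special_chars replace_special_chars replace_special_chars_alt
  apply String.toList_injective      -- compare the two strings by their char lists
  rw [toList_foldl_replace, main_chars, PySem.Str.toList_join,
      show ("" : String).toList = [] from rfl, join_empty, List.map_map]
  rfl
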